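-- pv_equiv track=rewrite | github.com/LEONFROMWORK/dockerExcel | python-service/app/core/validators.py | validate_sheet_name
-- ===== SOURCE A (Python) =====
-- def validate_sheet_name(name: str) -> bool:
--     """시트명 검증"""
--     if not name:
--         return False
--
--     # 금지된 문자
--     forbidden_chars = [":", "\\", "/", "?", "*", "[", "]"]
--     for char in forbidden_chars:
--         if char in name:
--             return False
--
--     # 길이 제한
--     if len(name) > 31:
--         return False
--
--     return True
-- ===== SOURCE B (Python) =====
-- def validate_sheet_name(name: str) -> bool:
--     """시트명 검증"""
--     # single left-to-right pass over the characters with a position counter: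
--     # reject on the first forbidden character; at the end the counter is the
--     # length, so name is valid iff 0 < count <= 31.
--     count = 0
--     for c in name:
--         if c in ":\\/?*[]":
--             return False
--         count += 1
--     return 0 < count <= 31
-- ===== Notes on version B (the rewrite author's own statement) =====
-- stated objective: alternative
-- what changed: Replaced A's loop over the seven forbidden characters (each a full substring scan of name) and its separate emptiness and length guards by one left-to-right pass over name's characters with a position counter, rejecting at the first forbidden character and deciding emptiness and the 31-char limit from the final counter.
import Mathlib
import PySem

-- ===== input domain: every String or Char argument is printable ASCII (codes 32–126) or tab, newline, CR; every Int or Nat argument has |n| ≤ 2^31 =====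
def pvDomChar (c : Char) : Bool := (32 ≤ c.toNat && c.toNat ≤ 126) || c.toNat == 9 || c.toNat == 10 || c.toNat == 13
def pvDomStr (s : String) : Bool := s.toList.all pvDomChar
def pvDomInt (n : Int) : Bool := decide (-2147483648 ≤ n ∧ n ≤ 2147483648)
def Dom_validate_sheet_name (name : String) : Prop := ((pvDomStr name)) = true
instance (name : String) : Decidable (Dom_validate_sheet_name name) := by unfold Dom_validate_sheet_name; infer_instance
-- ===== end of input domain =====

-- B replaces A's per-forbidden-char substring rescans and separate guards with one pass over the characters carrying a counter (objective: alternative).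

-- ===== PORT A =====
-- A checks each of the 7 forbidden characters by a separate substring test of name, returning False on the first hit.
def pvForbiddenA : List String := [":", "\\", "/", "?", "*", "[", "]"]

def pvLoopA (chars : List String) (name : String) : Bool :=
  match chars with
  | [] =>
      -- after the loop: length check, then return True
      if PySem.Str.len name > 31 then false else true
  | c :: rest =>
      if PySem.Str.isIn c name then false else pvLoopA rest name

def validate_sheet_name (name : String) : Bool :=
  if name.toList = [] then false
  else pvLoopA pvForbiddenA name

-- ===== PORT B =====
-- B walks name's characters once with a counter; 'c in ":\\/?*[]"' is membership in that 7-char string's characters.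
def pvForbChars : List Char := [':', '\\', '/', '?', '*', '[', ']']

def pvScanB (chars : List Char) (count : Nat) : Bool :=
  match chars with
  | [] => decide (0 < count ∧ count ≤ 31)
  | c :: rest => if pvForbChars.contains c then false else pvScanB rest (count + 1)

def validate_sheet_name_alt (name : String) : Bool :=
  pvScanB name.toList 0

-- ===== PRECONDITION & SPEC =====
def Spec_validate_sheet_name (name : String) (out : Bool) : Prop := out = validate_sheet_name_alt name
instance (name : String) (out : Bool) : Decidable (Spec_validate_sheet_name name out) := by unfold Spec_validate_sheet_name; infer_instance

-- ===== CLAIM =====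
def Claim_equal_validate_sheet_name : Prop := ∀ (name : String), Dom_validate_sheet_name name → Spec_validate_sheet_name name (validate_sheet_name name)

-- ===== LEMMAS AND PROOFS =====

-- '":" in name' etc. for a single-character needle is character membership
lemma isIn_single (c : Char) (s : String) :
    PySem.Str.isIn (String.ofList [c]) s = s.toList.contains c := by
  rcases hb : PySem.Str.isIn (String.ofList [c]) s with _ | _
  · symm
    rw [List.contains_eq_mem, decide_eq_false_iff_not]
    intro hmem
    obtain ⟨l, r, hlr⟩ := List.append_of_mem hmem
    have hinf : (String.ofList [c]).toList <:+: s.toList := ⟨l, r, by simp [hlr]⟩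
    rw [(PySem.Str.isIn_iff_infix _ _).mpr hinf] at hb
    exact Bool.noConfusion hb
  · symm
    rw [List.contains_eq_mem, decide_eq_true_eq]
    have hinf := (PySem.Str.isIn_iff_infix _ _).mp hb
    have : c ∈ (String.ofList [c]).toList := by simp
    exact hinf.mem this

lemma colon_lit : (":" : String) = String.ofList [':'] := rfl
lemma backslash_lit : ("\\" : String) = String.ofList ['\\'] := rfl
lemma slash_lit : ("/" : String) = String.ofList ['/'] := rfl
lemma question_lit : ("?" : String) = String.ofList ['?'] := rfl
lemma star_lit : ("*" : String) = String.ofList ['*'] := rfl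
lemma lbracket_lit : ("[" : String) = String.ofList ['['] := rfl
lemma rbracket_lit : ("]" : String) = String.ofList [']'] := rfl

-- B's scan, characterised: false iff a forbidden char occurs, else the length test on count + remaining length
lemma pvScanB_eq (l : List Char) (n : Nat) :
    pvScanB l n = if l.any (fun c => pvForbChars.contains c)
      then false else decide (0 < n + l.length ∧ n + l.length ≤ 31) := by
  induction l generalizing n with
  | nil => simp [pvScanB]
  | cons c rest ih =>
      simp only [pvScanB, List.any_cons]
      by_cases hc : c ∈ pvForbChars
      · simp [hc]
      · simp only [List.length_cons, ih]
        simp [hc]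
        have : n + 1 + rest.length = n + (rest.length + 1) := by omega
        rw [this]

-- ===== VERDICT =====
theorem validate_sheet_name_spec : Claim_equal_validate_sheet_name := by
  intro name _
  unfold Spec_validate_sheet_name validate_sheet_name validate_sheet_name_alt
  by_cases hnil : name.toList = []
  · simp [hnil, pvScanB]
  · simp only [hnil, if_false, pvForbiddenA, pvLoopA,
      colon_lit, backslash_lit, slash_lit, question_lit, star_lit, lbracket_lit, rbracket_lit,
      isIn_single, pvScanB_eq]
    have hlen : PySem.Str.len name = (name.toList.length : Int) := by
      simp [PySem.Str.len_eq]
    have hpos : 0 < name.toList.length := List.length_pos_iff.mpr hnil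
    by_cases hany : name.toList.any (fun c => pvForbChars.contains c) = true
    · -- some forbidden char occurs: B is false; show A's chain hits a false branch
      rw [if_pos hany]
      rw [List.any_eq_true] at hany
      obtain ⟨c, hcm, hcf⟩ := hany
      have hcf' : c ∈ pvForbChars := by
        rw [List.contains_eq_mem, decide_eq_true_eq] at hcf
        exact hcf
      fin_cases hcf' <;> simp_all [List.contains_eq_mem]
    · -- no forbidden char: A's seven tests are all false
      rw [if_neg hany]
      simp only [List.any_eq_true, not_exists, not_and] at hany
      have h : ∀ x ∈ pvForbChars, name.toList.contains x = false := by
        intro x hx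
        rw [List.contains_eq_mem, decide_eq_false_iff_not]
        intro hmem
        exact hany x hmem (by rw [List.contains_eq_mem]; exact decide_eq_true hx)
      have h1 := h ':' (by decide); have h2 := h '\\' (by decide)
      have h3 := h '/' (by decide); have h4 := h '?' (by decide)
      have h5 := h '*' (by decide); have h6 := h '[' (by decide)
      have h7 := h ']' (by decide)
      rw [h1, h2, h3, h4, h5, h6, h7]
      simp only [if_false, Bool.false_eq_true]
      rw [hlen]
      by_cases hgt : name.toList.length > 31
      · rw [if_pos (by exact_mod_cast hgt)]
        symm; rw [decide_eq_false_iff_not]; omega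
      · rw [if_neg (by exact_mod_cast hgt)]
        symm; rw [decide_eq_true_eq]; exact ⟨by omega, by omega⟩
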